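-- pv_equiv track=rewrite | github.com/pergazuz/global_house | main.py | _primary_type_th
-- ===== SOURCE A (Python) =====
-- _GPLACE_TYPE_TH: dict[str, str] = {
--     "hospital": "โรงพยาบาล",
--     "university": "มหาวิทยาลัย",
--     "school": "โรงเรียน",
--     "shopping_mall": "ห้างสรรพสินค้า",
--     "department_store": "ห้างสรรพสินค้า",
--     "supermarket": "ซูเปอร์มาร์เก็ต",
--     "grocery_or_supermarket": "ซูเปอร์มาร์เก็ต",
--     "hardware_store": "ร้านฮาร์ดแวร์",
--     "home_goods_store": "ร้านของตกแต่งบ้าน",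
--     "furniture_store": "ร้านเฟอร์นิเจอร์",
--     "gas_station": "ปั๊มน้ำมัน",
--     "bank": "ธนาคาร",
--     "atm": "ตู้ ATM",
--     "pharmacy": "ร้านขายยา",
--     "place_of_worship": "วัด/ศาสนสถาน",
--     "market": "ตลาด",
--     "park": "สวนสาธารณะ",
--     "lodging": "ที่พัก/โรงแรม",
--     "police": "สถานีตำรวจ",
--     "restaurant": "ร้านอาหาร",
--     "cafe": "คาเฟ่",
--     "bakery": "เบเกอรี่",
--     "bar": "บาร์",
--     "food": "ร้านอาหาร",
--     "convenience_store": "ร้านสะดวกซื้อ",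
--     "car_repair": "อู่ซ่อมรถ",
--     "car_wash": "ร้านล้างรถ",
--     "gym": "ฟิตเนส",
--     "movie_theater": "โรงภาพยนตร์",
--     "electronics_store": "ร้านอิเล็กทรอนิกส์",
--     "clothing_store": "ร้านเสื้อผ้า",
--     "beauty_salon": "ร้านเสริมสวย",
--     "laundry": "ร้านซักรีด",
-- }
--
-- _SKIP_TYPES = {
--     "point_of_interest", "establishment", "premise",
--     "street_address", "political", "locality", "sublocality",
--     "route", "intersection", "store",
-- }
--
-- _TYPE_PRIORITY = list(_GPLACE_TYPE_TH.keys())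
--
-- def _primary_type_th(types: list[str]) -> str:
--     """Return the most meaningful Thai label from a list of Google place types."""
--     for p in _TYPE_PRIORITY:
--         if p in types:
--             return _GPLACE_TYPE_TH[p]
--     for t in types:
--         if t not in _SKIP_TYPES and t in _GPLACE_TYPE_TH:
--             return _GPLACE_TYPE_TH[t]
--     return ""
-- ===== SOURCE B (Python) =====
-- # B: one pass over `types` keeping the smallest priority rank seen; the original's
-- # second loop is dead code (every dict key is in _TYPE_PRIORITY) and is dropped.
-- _GPLACE_TYPE_TH: dict[str, str] = {
--     "hospital": "โรงพยาบาล",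
--     "university": "มหาวิทยาลัย",
--     "school": "โรงเรียน",
--     "shopping_mall": "ห้างสรรพสินค้า",
--     "department_store": "ห้างสรรพสินค้า",
--     "supermarket": "ซูเปอร์มาร์เก็ต",
--     "grocery_or_supermarket": "ซูเปอร์มาร์เก็ต",
--     "hardware_store": "ร้านฮาร์ดแวร์",
--     "home_goods_store": "ร้านของตกแต่งบ้าน",
--     "furniture_store": "ร้านเฟอร์นิเจอร์",
--     "gas_station": "ปั๊มน้ำมัน",
--     "bank": "ธนาคาร",
--     "atm": "ตู้ ATM",
--     "pharmacy": "ร้านขายยา",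
--     "place_of_worship": "วัด/ศาสนสถาน",
--     "market": "ตลาด",
--     "park": "สวนสาธารณะ",
--     "lodging": "ที่พัก/โรงแรม",
--     "police": "สถานีตำรวจ",
--     "restaurant": "ร้านอาหาร",
--     "cafe": "คาเฟ่",
--     "bakery": "เบเกอรี่",
--     "bar": "บาร์",
--     "food": "ร้านอาหาร",
--     "convenience_store": "ร้านสะดวกซื้อ",
--     "car_repair": "อู่ซ่อมรถ",
--     "car_wash": "ร้านล้างรถ",
--     "gym": "ฟิตเนส",
--     "movie_theater": "โรงภาพยนตร์",
--     "electronics_store": "ร้านอิเล็กทรอนิกส์",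
--     "clothing_store": "ร้านเสื้อผ้า",
--     "beauty_salon": "ร้านเสริมสวย",
--     "laundry": "ร้านซักรีด",
-- }
--
-- _RANK = {k: i for i, k in enumerate(_GPLACE_TYPE_TH)}
-- _LABELS = list(_GPLACE_TYPE_TH.values())
--
--
-- def _primary_type_th(types: list[str]) -> str:
--     """Return the most meaningful Thai label from a list of Google place types."""
--     best = None
--     for t in types:
--         r = _RANK.get(t)
--         if r is not None and (best is None or r < best):
--             best = r
--     return "" if best is None else _LABELS[best]
-- ===== Notes on version B (the rewrite author's own statement) =====
-- stated objective: faster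
-- what changed: Instead of scanning the 33-entry priority list and probing `types` for each entry (plus a dead second fallback loop), B builds a rank table once and makes a single pass over `types`, keeping the smallest rank seen; the dead fallback loop is removed.
import Mathlib
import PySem

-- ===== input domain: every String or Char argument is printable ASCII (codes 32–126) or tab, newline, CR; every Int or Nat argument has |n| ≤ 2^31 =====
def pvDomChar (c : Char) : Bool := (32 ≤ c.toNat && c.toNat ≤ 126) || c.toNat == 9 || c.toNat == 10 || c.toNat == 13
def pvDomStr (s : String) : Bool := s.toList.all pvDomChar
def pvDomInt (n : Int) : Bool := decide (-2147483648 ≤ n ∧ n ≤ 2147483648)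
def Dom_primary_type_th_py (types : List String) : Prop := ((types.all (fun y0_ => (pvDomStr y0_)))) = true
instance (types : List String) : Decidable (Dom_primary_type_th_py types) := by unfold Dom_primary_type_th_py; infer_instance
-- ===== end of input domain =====

-- B replaces A's scan of the 33-entry priority list (plus a dead fallback loop) by one pass
-- over `types` keeping the smallest priority rank; equivalence is proved for all inputs.

-- ===== PORT A =====
-- _GPLACE_TYPE_TH as an association list in insertion order (= its items; _TYPE_PRIORITY is exactly its key list)
def pvTable : List (String × String) := [("hospital", "โรงพยาบาล"), ("university", "มหาวิทยาลัย"), ("school", "โรงเรียน"), ("shopping_mall", "ห้างสรรพสินค้า"), ("department_store", "ห้างสรรพสินค้า"), ("supermarket", "ซูเปอร์มาร์เก็ต"), ("grocery_or_supermarket", "ซูเปอร์มาร์เก็ต"), ("hardware_store", "ร้านฮาร์ดแวร์"), ("home_goods_store", "ร้านของตกแต่งบ้าน"), ("furniture_store", "ร้านเฟอร์นิเจอร์"), ("gas_station", "ปั๊มน้ำมัน"), ("bank", "ธนาคาร"), ("atm", "ตู้ ATM"), ("pharmacy", "ร้านขายยา"), ("place_of_worship", "วัด/ศาสนสถาน"),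 ("market", "ตลาด"), ("park", "สวนสาธารณะ"), ("lodging", "ที่พัก/โรงแรม"), ("police", "สถานีตำรวจ"), ("restaurant", "ร้านอาหาร"), ("cafe", "คาเฟ่"), ("bakery", "เบเกอรี่"), ("bar", "บาร์"), ("food", "ร้านอาหาร"), ("convenience_store", "ร้านสะดวกซื้อ"), ("car_repair", "อู่ซ่อมรถ"), ("car_wash", "ร้านล้างรถ"), ("gym", "ฟิตเนส"), ("movie_theater", "โรงภาพยนตร์"), ("electronics_store", "ร้านอิเล็กทรอนิกส์"), ("clothing_store", "ร้านเสื้อผ้า"), ("beauty_salon", "ร้านเสริมสวย"), ("laundry", "ร้านซักรีด")]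

def pvDict : PySem.Dict String String := PySem.Dict.mk pvTable  -- keys are distinct, so the literal dict is its items list

def pvSkip : List String := PySem.Set.ofList ["route", "locality", "store", "intersection", "sublocality", "point_of_interest", "political", "establishment", "street_address", "premise"]

-- first loop: `for p in _TYPE_PRIORITY: if p in types: return _GPLACE_TYPE_TH[p]`
-- (_TYPE_PRIORITY is the dict's key list, so the loop walks the dict's items in order)
def aLoop1 : List (String × String) → List String → Option String
  | [], _ => none
  | kv :: rest, types => if types.contains kv.1 then some kv.2 else aLoop1 rest types

-- second loop: `for t in types: if t not in _SKIP_TYPES and t in _GPLACE_TYPE_TH: return _GPLACE_TYPE_TH[t]`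
def aLoop2 : List String → Option String
  | [] => none
  | t :: rest =>
    if !(pvSkip.contains t) then
      match pvDict.get? t with
      | some v => some v
      | none => aLoop2 rest
    else aLoop2 rest

def primary_type_th_py (types : List String) : String :=
  match aLoop1 pvTable types with
  | some v => v
  | none =>
    match aLoop2 types with
    | some v => v
    | none => ""

-- ===== PORT B =====
-- the dict's keys in insertion order (for _RANK = {k: i for i, k in enumerate(_GPLACE_TYPE_TH)})
def pvKeysB : List String := ["hospital", "university", "school", "shopping_mall", "department_store", "supermarket", "grocery_or_supermarket", "hardware_store", "home_goods_store", "furniture_store", "gas_station", "bank", "atm", "pharmacy", "place_of_worship", "market", "park", "lodging", "police", "restaurant", "cafe", "bakery", "bar", "food", "convenience_store", "car_repair", "car_wash", "gym", "movie_theater", "electronics_store", "clothing_store", "beauty_salon", "laundry"]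

-- _LABELS = list(_GPLACE_TYPE_TH.values())  (Thai written with \u escapes; same strings)
def pvLabelsB : List String := ["\u0E42\u0E23\u0E07\u0E1E\u0E22\u0E32\u0E1A\u0E32\u0E25", "\u0E21\u0E2B\u0E32\u0E27\u0E34\u0E17\u0E22\u0E32\u0E25\u0E31\u0E22", "\u0E42\u0E23\u0E07\u0E40\u0E23\u0E35\u0E22\u0E19", "\u0E2B\u0E49\u0E32\u0E07\u0E2A\u0E23\u0E23\u0E1E\u0E2A\u0E34\u0E19\u0E04\u0E49\u0E32", "\u0E2B\u0E49\u0E32\u0E07\u0E2A\u0E23\u0E23\u0E1E\u0E2A\u0E34\u0E19\u0E04\u0E49\u0E32", "\u0E0B\u0E39\u0E40\u0E1B\u0E2D\u0E23\u0E4C\u0E21\u0E32\u0E23\u0E4C\u0E40\u0E01\u0E47\u0E15", "\u0E0B\u0E39\u0E40\u0E1B\u0E2D\u0E23\u0E4C\u0E21\u0E32\u0E23\u0E4C\u0E40\u0E01\u0E47\u0E15", "\u0E23\u0E49\u0E32\u0E19\u0E2E\u0E32\u0E23\u0E4C\u0E14\u0E41\u0E27\u0E23\u0E4C", "\u0E23\u0E49\u0E32\u0E19\u0E02\u0E2D\u0E07\u0E15\u0E01\u0E41\u0E15\u0E48\u0E07\u0E1A\u0E49\u0E32\u0E19",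 "\u0E23\u0E49\u0E32\u0E19\u0E40\u0E1F\u0E2D\u0E23\u0E4C\u0E19\u0E34\u0E40\u0E08\u0E2D\u0E23\u0E4C", "\u0E1B\u0E31\u0E4A\u0E21\u0E19\u0E49\u0E33\u0E21\u0E31\u0E19", "\u0E18\u0E19\u0E32\u0E04\u0E32\u0E23", "\u0E15\u0E39\u0E49 ATM", "\u0E23\u0E49\u0E32\u0E19\u0E02\u0E32\u0E22\u0E22\u0E32", "\u0E27\u0E31\u0E14/\u0E28\u0E32\u0E2A\u0E19\u0E2A\u0E16\u0E32\u0E19", "\u0E15\u0E25\u0E32\u0E14", "\u0E2A\u0E27\u0E19\u0E2A\u0E32\u0E18\u0E32\u0E23\u0E13\u0E30", "\u0E17\u0E35\u0E48\u0E1E\u0E31\u0E01/\u0E42\u0E23\u0E07\u0E41\u0E23\u0E21", "\u0E2A\u0E16\u0E32\u0E19\u0E35\u0E15\u0E33\u0E23\u0E27\u0E08", "\u0E23\u0E49\u0E32\u0E19\u0E2D\u0E32\u0E2B\u0E32\u0E23", "\u0E04\u0E32\u0E40\u0E1F\u0E48", "\u0E40\u0E1A\u0E40\u0E01\u0E2D\u0E23\u0E35\u0E48",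 "\u0E1A\u0E32\u0E23\u0E4C", "\u0E23\u0E49\u0E32\u0E19\u0E2D\u0E32\u0E2B\u0E32\u0E23", "\u0E23\u0E49\u0E32\u0E19\u0E2A\u0E30\u0E14\u0E27\u0E01\u0E0B\u0E37\u0E49\u0E2D", "\u0E2D\u0E39\u0E48\u0E0B\u0E48\u0E2D\u0E21\u0E23\u0E16", "\u0E23\u0E49\u0E32\u0E19\u0E25\u0E49\u0E32\u0E07\u0E23\u0E16", "\u0E1F\u0E34\u0E15\u0E40\u0E19\u0E2A", "\u0E42\u0E23\u0E07\u0E20\u0E32\u0E1E\u0E22\u0E19\u0E15\u0E23\u0E4C", "\u0E23\u0E49\u0E32\u0E19\u0E2D\u0E34\u0E40\u0E25\u0E47\u0E01\u0E17\u0E23\u0E2D\u0E19\u0E34\u0E01\u0E2A\u0E4C", "\u0E23\u0E49\u0E32\u0E19\u0E40\u0E2A\u0E37\u0E49\u0E2D\u0E1C\u0E49\u0E32", "\u0E23\u0E49\u0E32\u0E19\u0E40\u0E2A\u0E23\u0E34\u0E21\u0E2A\u0E27\u0E22", "\u0E23\u0E49\u0E32\u0E19\u0E0B\u0E31\u0E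01\u0E23\u0E35\u0E14"]

-- _RANK = {k: i for i, k in enumerate(_GPLACE_TYPE_TH)}  (comprehension keys are distinct)
def pvRank : PySem.Dict String Nat := PySem.Dict.mk pvKeysB.zipIdx

-- loop body: r = _RANK.get(t); if r is not None and (best is None or r < best): best = r
def bStep (best : Option Nat) (t : String) : Option Nat :=
  match pvRank.get? t with
  | none => best
  | some r =>
    match best with
    | none => some r
    | some b => if r < b then some r else some b

def primary_type_th_py_alt (types : List String) : String :=
  match types.foldl bStep none with
  | none => ""
  | some b => pvLabelsB.getD b ""  -- `_LABELS[best]`: best is always a valid index, so plain getD is exact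

-- ===== PRECONDITION & SPEC =====
def Spec_primary_type_th_py (types : List String) (out : String) : Prop := out = primary_type_th_py_alt types
instance (types : List String) (out : String) : Decidable (Spec_primary_type_th_py types out) := by unfold Spec_primary_type_th_py; infer_instance

-- ===== CLAIM (what is proved, stated in full; the proofs are below) =====
def Claim_equal_primary_type_th_py : Prop := ∀ (types : List String), Dom_primary_type_th_py types → Spec_primary_type_th_py types (primary_type_th_py types)

-- ===== LEMMAS AND PROOFS =====

-- B's key and label lists are the projections of A's table (same string literals)
lemma keysB_eq : pvKeysB = pvTable.map Prod.fst := by decide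
lemma labelsB_eq : pvLabelsB = pvTable.map Prod.snd := by decide

-- minimum of two optional ranks (none = no candidate yet)
def omin : Option Nat → Option Nat → Option Nat
  | none, b => b
  | some a, none => some a
  | some a, some b => some (min a b)

lemma omin_none_right (a : Option Nat) : omin a none = a := by cases a <;> rfl

lemma omin_assoc (a b c : Option Nat) : omin (omin a b) c = omin a (omin b c) := by
  cases a <;> cases b <;> cases c <;> simp [omin, Nat.min_assoc]

lemma omin_some_zero_left (y : Option Nat) : omin (some 0) y = some 0 := by
  cases y <;> simp [omin]

lemma omin_some_zero_right (x : Option Nat) : omin x (some 0) = some 0 := by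
  cases x <;> simp [omin]

lemma omin_map_succ (x y : Option Nat) :
    omin (x.map (· + 1)) (y.map (· + 1)) = (omin x y).map (· + 1) := by
  cases x <;> cases y <;> simp [omin] <;> omega

lemma bStep_eq_omin (best : Option Nat) (t : String) :
    bStep best t = omin best (pvRank.get? t) := by
  unfold bStep
  cases pvRank.get? t with
  | none => simp [omin_none_right]
  | some r =>
    cases best with
    | none => rfl
    | some b =>
      simp only [omin]
      by_cases h : r < b <;> simp [h] <;> omega

lemma findIdx?_or {α : Type} (p q : α → Bool) (l : List α) :
    List.findIdx? (fun x => p x || q x) l = omin (List.findIdx? p l) (List.findIdx? q l) := by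
  induction l with
  | nil => rfl
  | cons a l ih =>
    cases hp : p a <;> cases hq : q a <;>
      simp [List.findIdx?_cons, hp, hq, ih, omin_some_zero_left, omin_some_zero_right, omin_map_succ]

lemma findIdx?_false {α : Type} (l : List α) : List.findIdx? (fun _ => false) l = none := by
  induction l with
  | nil => rfl
  | cons a l ih => simp [List.findIdx?_cons, ih]

-- _RANK.get(t) is the index of t's entry in the table
lemma rank_zipIdx (l : List (String × String)) (n : Nat) (t : String) :
    (PySem.Dict.mk ((l.map Prod.fst).zipIdx n)).get? t
      = (List.findIdx? (fun kv => kv.1 == t) l).map (· + n) := by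
  induction l generalizing n with
  | nil => rfl
  | cons a l ih =>
    cases h : a.1 == t <;>
      simp [List.zipIdx_cons, PySem.Dict.get?_mk_cons, List.findIdx?_cons, h, ih (n + 1),
            Option.map_map, Function.comp]
    · congr 1; funext i; omega

lemma rank_eq (t : String) :
    pvRank.get? t = List.findIdx? (fun kv => kv.1 == t) pvTable := by
  rw [pvRank, keysB_eq, rank_zipIdx]
  simp

-- the fold computes the least table index whose key occurs in `types`
lemma foldl_bStep (types : List String) (acc : Option Nat) :
    types.foldl bStep acc
      = omin acc (List.findIdx? (fun kv => types.contains kv.1) pvTable) := by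
  induction types generalizing acc with
  | nil =>
    simp only [List.foldl_nil, List.contains_nil]
    rw [findIdx?_false, omin_none_right]
  | cons t rest ih =>
    rw [List.foldl_cons, ih, bStep_eq_omin, omin_assoc]
    congr 1
    have : (fun kv : String × String => (t :: rest).contains kv.1)
         = (fun kv : String × String => (kv.1 == t) || rest.contains kv.1) := by
      funext kv
      cases h : kv.1 == t <;> simp_all [List.contains_cons]
    rw [this, findIdx?_or, rank_eq]

-- selecting the label by least index = taking the first matching entry
lemma match_findIdx_find (p : String × String → Bool) (tab : List (String × String)) :
    (match List.findIdx? p tab with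
     | none => ""
     | some i => (tab.map Prod.snd).getD i "")
    = (match tab.find? p with
       | some kv => kv.2
       | none => "") := by
  induction tab with
  | nil => rfl
  | cons a l ih =>
    cases hp : p a with
    | true => simp [List.findIdx?_cons, hp]
    | false =>
      simp only [List.findIdx?_cons, List.find?_cons, hp, Bool.false_eq_true, if_false]
      rw [← ih]
      cases h : List.findIdx? p l <;> simp

lemma aLoop1_eq_find? (tab : List (String × String)) (types : List String) :
    aLoop1 tab types = (tab.find? (fun kv => types.contains kv.1)).map Prod.snd := by
  induction tab with
  | nil => rfl
  | cons a l ih =>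
    by_cases hm : a.1 ∈ types <;> simp [aLoop1, List.find?_cons, hm, ih]

lemma get?_mk_eq_none (l : List (String × String)) (types : List String) (t : String)
    (hH : ∀ kv ∈ l, types.contains kv.1 = false) (ht : t ∈ types) :
    (PySem.Dict.mk l).get? t = none := by
  induction l with
  | nil => rfl
  | cons a l ih =>
    rw [PySem.Dict.get?_mk_cons]
    have ha := hH a (by simp)
    have hne : (a.1 == t) = false := by
      cases h : a.1 == t
      · rfl
      · exfalso
        have : a.1 = t := by simpa using h
        subst this
        simp at ha
        exact ha ht
    rw [hne]
    simp only [Bool.false_eq_true, if_false]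
    exact ih (fun kv hkv => hH kv (by simp [hkv]))

lemma aLoop2_none (types ts : List String)
    (hH : ∀ kv ∈ pvTable, types.contains kv.1 = false)
    (hsub : ∀ t ∈ ts, t ∈ types) :
    aLoop2 ts = none := by
  induction ts with
  | nil => rfl
  | cons t rest ih =>
    have hget : pvDict.get? t = none := by
      rw [pvDict]
      exact get?_mk_eq_none pvTable types t hH (hsub t (by simp))
    have htail : aLoop2 rest = none := ih (fun x hx => hsub x (by simp [hx]))
    unfold aLoop2
    rw [hget]
    cases h : pvSkip.contains t <;> simp [h, htail]

-- ===== VERDICT (by name: the statement is the Claim_ definition above) =====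
theorem primary_type_th_py_spec : Claim_equal_primary_type_th_py := by
  intro types _
  unfold Spec_primary_type_th_py primary_type_th_py primary_type_th_py_alt
  rw [foldl_bStep, aLoop1_eq_find?, labelsB_eq]
  simp only [omin]
  rw [match_findIdx_find (fun kv => types.contains kv.1) pvTable]
  cases hf : pvTable.find? (fun kv => types.contains kv.1) with
  | some kv => simp
  | none =>
    have hH : ∀ kv ∈ pvTable, types.contains kv.1 = false := by
      intro kv hkv
      have := List.find?_eq_none.mp hf kv hkv
      simpa using this
    have h2 : aLoop2 types = none := aLoop2_none types types hH (fun _ h => h)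
    simp [h2]
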